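-- pv_equiv track=rewrite | github.com/JanSochman/AoC | 2024/day05.py | part2
-- ===== SOURCE A (Python) =====
-- from collections import deque, Counter, defaultdict, namedtuple
--
-- def part2(data):
--     total = 0
--
--     rules = Counter()
--     mode = 'rules'
--     for L in data:
--         if len(L) == 0:
--             mode = 'updates'
--             continue
--
--         if mode == 'rules':
--             rules[L] = 1
--
--         if mode == 'updates':
--             pages = L.split(',')
--             right_order = True
--             for p_cur, p_next in zip(pages[:-1], pages[1:]):
--                 if rules[p_next + '|' + p_cur] > 0:
--                     right_order = False
--                     break
--
--             if not right_order:
--                 # bubble sort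
--                 swap = True
--                 while swap:
--                     for i in range(len(pages)):
--                         swap = False
--                         for j in range(i+1, len(pages)):
--                             if rules[pages[j] + '|' + pages[i]]:
--                                 pages[i], pages[j] = pages[j], pages[i]
--                                 swap = True
--
--                 total += int(pages[len(pages) // 2])
--
--     return total
-- ===== SOURCE B (Python) =====
-- def part2(data):
--     # locate the blank line separating rules from updates
--     try:
--         cut = data.index('')
--     except ValueError:
--         return 0
--     rules = set(data[:cut])
--     total = 0
--     for L in data[cut + 1:]:
--         if not L:
--             continue
--         pages = L.split(',')
--         if any(b + '|' + a in rules for a, b in zip(pages, pages[1:])):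
--             s = _selsort(pages, rules)
--             total += int(s[len(s) // 2])
--     return total
--
--
-- def _selsort(pages, rules):
--     # recursively move the rule-minimal page to the front of the remainder
--     if not pages:
--         return []
--     c = pages[0]
--     rest = []
--     for y in pages[1:]:
--         if y + '|' + c in rules:
--             rest.append(c)
--             c = y
--         else:
--             rest.append(y)
--     return [c] + _selsort(rest, rules)
-- ===== Notes on version B (the rewrite author's own statement) =====
-- stated objective: simpler
-- what changed: B splits the input at the first blank line instead of threading a mode flag, keeps the rules as a plain set instead of a Counter, and replaces A's index-and-swap bubble/selection loops (a while loop around two nested index loops with in-place swaps) by a recursive selection sort that extracts the rule-minimal page of the remainder with one functional scan.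
-- outside the precondition, e.g. on part2(['1|2', '', '2,1,x']): A returns 2, B returns 2
import Mathlib
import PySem

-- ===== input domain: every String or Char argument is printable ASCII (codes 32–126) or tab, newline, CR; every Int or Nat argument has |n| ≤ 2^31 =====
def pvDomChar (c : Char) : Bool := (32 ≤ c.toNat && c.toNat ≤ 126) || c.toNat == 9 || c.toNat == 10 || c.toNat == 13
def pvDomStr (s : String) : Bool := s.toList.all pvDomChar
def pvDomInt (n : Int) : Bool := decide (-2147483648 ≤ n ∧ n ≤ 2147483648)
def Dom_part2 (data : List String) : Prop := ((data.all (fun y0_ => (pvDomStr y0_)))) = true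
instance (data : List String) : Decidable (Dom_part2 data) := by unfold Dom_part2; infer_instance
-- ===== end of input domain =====

-- B replaces A's mode flag, Counter and swap-based while/bubble loops by splitting the input at
-- the first blank line, a plain rule set, and a recursive functional selection sort (objective: simpler).

-- ===== PORT A =====
-- L.split(',') (total wrapper: the separator "," is never empty, so split? is always some)
def splitC (L : String) : List String := (PySem.Str.split? L ",").getD []

-- early-exit loop over zip(pages[:-1], pages[1:]) deciding right_order
def aCheck (d : PySem.Dict String Int) : List (String × String) → Bool
  | [] => true
  | (pc, pn) :: rest => if d.getD (pn ++ "|" ++ pc) 0 > 0 then false else aCheck d rest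

-- body of the j-loop: if rules[pages[j]+'|'+pages[i]]: swap pages[i], pages[j]; swap = True
def stepJ (d : PySem.Dict String Int) (i : Int) (st : List String × Bool) (j : Int) :
    List String × Bool :=
  let vj := PySem.List.pyGetD st.1 j ""
  let vi := PySem.List.pyGetD st.1 i ""
  if d.getD (vj ++ "|" ++ vi) 0 ≠ 0 then
    (PySem.List.pySetD (PySem.List.pySetD st.1 i vj) j vi, true)
  else st

-- for j in range(i+1, len(pages)): …
def aInner (d : PySem.Dict String Int) (i : Int) (st : List String × Bool) :
    List String × Bool :=
  (PySem.List.pyRange (i + 1) ((st.1.length : Nat) : Int) 1).foldl (stepJ d i) st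

-- for i in range(len(pages)): swap = False; <j-loop>
def aPass (d : PySem.Dict String Int) (st : List String × Bool) : List String × Bool :=
  (PySem.List.pyRange 0 ((st.1.length : Nat) : Int) 1).foldl
    (fun st i => aInner d i (st.1, false)) st

-- while swap: … (fuel-guarded; fuel only makes the loop total)
def aBubble (d : PySem.Dict String Int) : Nat → List String → List String
  | 0, pgs => pgs
  | (f + 1), pgs =>
    let st := aPass d (pgs, false)
    if st.2 then aBubble d f st.1 else st.1

-- body of A's updates-mode branch for one nonempty line
def aUpdate (d : PySem.Dict String Int) (total : Int) (L : String) : Int :=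
  let pages := splitC L
  let ro := aCheck d ((PySem.List.slice pages none (some (-1))).zip
                      (PySem.List.slice pages (some 1) none))
  if ro then total
  else
    let pages := aBubble d (pages.length + 1) pages
    total + (PySem.Int.ofStr? (PySem.List.pyGetD pages
              (PySem.Int.floordiv ((pages.length : Nat) : Int) 2) "")).getD 0

-- one iteration of A's main loop; state = (total, rules, mode == 'updates')
def aStep (st : Int × PySem.Dict String Int × Bool) (L : String) :
    Int × PySem.Dict String Int × Bool :=
  if PySem.Str.len L = 0 then (st.1, st.2.1, true)
  else if st.2.2 then (aUpdate st.2.1 st.1 L, st.2.1, true)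
  else (st.1, st.2.1.insert L 1, false)

def part2 (data : List String) : Int :=
  (data.foldl aStep (0, PySem.Dict.empty, false)).1

-- ===== PORT B =====
-- body of _selsort's scan: keep the rule-minimal page seen so far, append the loser to rest
def bSelStep (rules : PySem.Set String) (st : String × List String) (y : String) :
    String × List String :=
  if PySem.Set.contains rules (y ++ "|" ++ st.1) then (y, st.2 ++ [st.1])
  else (st.1, st.2 ++ [y])

theorem bSel_fold_len (rules : PySem.Set String) :
    ∀ (ys : List String) (c : String) (acc : List String),
      ((ys.foldl (bSelStep rules) (c, acc)).2).length = acc.length + ys.length := by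
  intro ys
  induction ys with
  | nil => intro c acc; simp
  | cons y ys ih =>
    intro c acc
    simp only [List.foldl_cons, bSelStep]
    split <;> simp [ih] <;> omega

-- _selsort(pages, rules)
def bSel (rules : PySem.Set String) : List String → List String
  | [] => []
  | c :: rest =>
    let st := rest.foldl (bSelStep rules) (c, [])
    st.1 :: bSel rules st.2
termination_by l => l.length
decreasing_by
  have h := bSel_fold_len rules rest c []
  simpa [st] using Nat.lt_succ_of_le (Nat.le_of_eq h)

-- body of B's loop over the updates section
def bUpdStep (rules : PySem.Set String) (total : Int) (L : String) : Int :=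
  if PySem.Str.len L = 0 then total
  else
    let pages := splitC L
    if (pages.zip (PySem.List.slice pages (some 1) none)).any
        (fun p => PySem.Set.contains rules (p.2 ++ "|" ++ p.1)) then
      let s := bSel rules pages
      total + (PySem.Int.ofStr? (PySem.List.pyGetD s
                (PySem.Int.floordiv ((s.length : Nat) : Int) 2) "")).getD 0
    else total

def part2_alt (data : List String) : Int :=
  match PySem.List.index? data "" with
  | none => 0
  | some cut =>
    let rules := PySem.Set.ofList (PySem.List.slice data none (some ((cut : Nat) : Int)))
    (PySem.List.slice data (some (((cut : Nat) : Int) + 1)) none).foldl (bUpdStep rules) 0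

-- ===== PRECONDITION & SPEC =====
-- input-shape helpers for Pre_ (the rule lines, the update lines, and the adjacent-pair
-- misordering test A and B both apply; they re-read the input only, not the ports)
def pvRuleLines (data : List String) : List String := data.takeWhile (fun L => L ≠ "")
def pvUpdLines (data : List String) : List String :=
  ((data.dropWhile (fun L => L ≠ "")).drop 1).filter (fun L => L ≠ "")
def pvMisordered (rl : List String) (pages : List String) : Bool :=
  (pages.zip pages.tail).any (fun p => rl.contains (p.2 ++ "|" ++ p.1))

-- Pre_ excludes inputs where a misordered update line contains a page token that is not an
-- int literal: there Python's int() on the sorted middle page may raise ValueError.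
def Pre_part2 (data : List String) : Prop :=
  ∀ L ∈ pvUpdLines data, pvMisordered (pvRuleLines data) (splitC L) = true →
    ∀ p ∈ splitC L, (PySem.Int.ofStr? p).isSome
instance (data : List String) : Decidable (Pre_part2 data) := by
  unfold Pre_part2; infer_instance

def pvWitness_part2 : List String := ["1|2", "", "2,1"]

def Spec_part2 (data : List String) (out : Int) : Prop := out = part2_alt data
instance (data : List String) (out : Int) : Decidable (Spec_part2 data out) := by
  unfold Spec_part2; infer_instance

-- ===== CLAIM (what is proved, stated in full; the proofs are below) =====
def Claim_equal_part2 : Prop :=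
  ∀ (data : List String), Dom_part2 data → Pre_part2 data → Spec_part2 data (part2 data)

-- ===== LEMMAS AND PROOFS =====

def selGo (d : PySem.Dict String Int) : String → List String → List String → String × List String
  | c, proc, [] => (c, proc)
  | c, proc, y :: ys =>
    if d.getD (y ++ "|" ++ c) 0 ≠ 0 then selGo d y (proc ++ [c]) ys
    else selGo d c (proc ++ [y]) ys

theorem setHead (pre t : List String) (c v : String) :
    (pre ++ c :: t).set pre.length v = pre ++ v :: t := by
  rw [List.set_append_right _ _ (by omega)]
  simp

theorem setMid (pre t : List String) (c v : String) (k : Nat) :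
    (pre ++ c :: t).set (pre.length + (1 + k)) v = pre ++ c :: t.set k v := by
  rw [List.set_append_right _ _ (by omega)]
  congr 1
  have : pre.length + (1 + k) - pre.length = k + 1 := by omega
  rw [this]
  rfl

theorem setAfter (t u : List String) (y v : String) :
    (t ++ y :: u).set t.length v = t ++ v :: u := by
  rw [List.set_append_right _ _ (by omega)]
  simp

theorem getMid (pre t u : List String) (c y : String) :
    (pre ++ c :: (t ++ y :: u)).getD (pre.length + (1 + t.length)) "" = y := by
  rw [List.getD_append_right _ _ _ _ (by omega)]
  have : pre.length + (1 + t.length) - pre.length = t.length + 1 := by omega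
  rw [this]
  show (t ++ y :: u).getD t.length "" = y
  rw [List.getD_append_right _ _ _ _ (by omega)]
  simp

theorem getHead (pre t : List String) (c : String) :
    (pre ++ c :: t).getD pre.length "" = c := by
  rw [List.getD_append_right _ _ _ _ (by omega)]
  simp

theorem L1 (d : PySem.Dict String Int) (pre : List String) :
    ∀ (ys : List String) (c : String) (proc : List String) (sw : Bool),
      ∃ sw', (PySem.List.pyRange ((pre.length + (1 + proc.length) : Nat) : Int)
               ((pre.length + (1 + (proc.length + ys.length)) : Nat) : Int) 1).foldl
          (stepJ d ((pre.length : Nat) : Int)) (pre ++ c :: (proc ++ ys), sw)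
        = (pre ++ (selGo d c proc ys).1 :: (selGo d c proc ys).2, sw') := by
  intro ys
  induction ys with
  | nil =>
    intro c proc sw
    refine ⟨sw, ?_⟩
    rw [PySem.List.pyRange_one_eq_nil (by simp)]
    simp [selGo]
  | cons y ys ih =>
    intro c proc sw
    rw [PySem.List.pyRange_one_cons (by push_cast [List.length_cons]; omega)]
    rw [List.foldl_cons]
    have hstep : stepJ d ((pre.length : Nat) : Int) (pre ++ c :: (proc ++ y :: ys), sw)
        ((pre.length + (1 + proc.length) : Nat) : Int) =
        if d.getD (y ++ "|" ++ c) 0 ≠ 0 then (pre ++ y :: ((proc ++ [c]) ++ ys), true)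
        else (pre ++ c :: (proc ++ y :: ys), sw) := by
      simp only [stepJ, PySem.List.pyGetD_natCast, getMid pre proc ys c y, getHead,
        PySem.List.pySetD_natCast]
      split
      · rw [setHead, setMid, setAfter]
        simp
      · rfl
    rw [hstep]
    by_cases hc : d.getD (y ++ "|" ++ c) 0 ≠ 0
    · rw [if_pos hc]
      have h2 := ih y (proc ++ [c]) true
      simp only [List.length_append, List.length_cons, List.length_nil] at h2 ⊢
      obtain ⟨sw', h2⟩ := h2
      refine ⟨sw', ?_⟩
      simp only [selGo, if_pos hc]
      have e1 : pre.length + (1 + (proc.length + 1)) = pre.length + (1 + proc.length) + 1 := by omega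
      have e2 : pre.length + (1 + (proc.length + 1 + ys.length)) = pre.length + (1 + (proc.length + (ys.length + 1))) := by omega
      rw [e1, e2] at h2
      push_cast at h2 ⊢
      exact h2
    · rw [if_neg hc]
      have h2 := ih c (proc ++ [y]) sw
      simp only [List.length_append, List.length_cons, List.length_nil] at h2 ⊢
      obtain ⟨sw', h2⟩ := h2
      refine ⟨sw', ?_⟩
      simp only [selGo, if_neg hc]
      have e1 : pre.length + (1 + (proc.length + 1)) = pre.length + (1 + proc.length) + 1 := by omega
      have e2 : pre.length + (1 + (proc.length + 1 + ys.length)) = pre.length + (1 + (proc.length + (ys.length + 1))) := by omega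
      rw [e1, e2] at h2
      push_cast at h2 ⊢
      simpa using h2

theorem selGo_len (d : PySem.Dict String Int) :
    ∀ (ys : List String) (c : String) (proc : List String),
      ((selGo d c proc ys).2).length = proc.length + ys.length := by
  intro ys
  induction ys with
  | nil => intro c proc; simp [selGo]
  | cons y ys ih =>
    intro c proc
    simp only [selGo]
    split <;> simp [ih] <;> omega

def selList (d : PySem.Dict String Int) : List String → List String
  | [] => []
  | c :: rest => (selGo d c [] rest).1 :: selList d (selGo d c [] rest).2
termination_by l => l.length
decreasing_by
  have h := selGo_len d rest c []
  simp only [List.length_nil, List.length_cons] at *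
  omega

theorem L2 (d : PySem.Dict String Int) :
    ∀ (n : Nat) (xs pre : List String) (sw : Bool), xs.length = n →
      (PySem.List.pyRange ((pre.length : Nat) : Int) ((pre.length + xs.length : Nat) : Int) 1).foldl
        (fun st i => aInner d i (st.1, false)) (pre ++ xs, sw)
      = (pre ++ selList d xs, if xs.isEmpty then sw else false) := by
  intro n
  induction n with
  | zero =>
    intro xs pre sw hn
    have hx : xs = [] := List.length_eq_zero_iff.mp hn
    subst hx
    rw [PySem.List.pyRange_one_eq_nil (by simp)]
    simp [selList]
  | succ n ih =>
    intro xs pre sw hn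
    obtain ⟨x, ys, rfl⟩ : ∃ x ys, xs = x :: ys := by
      cases xs with
      | nil => simp at hn
      | cons a b => exact ⟨a, b, rfl⟩
    have hys : ys.length = n := by simpa using hn
    rw [PySem.List.pyRange_one_cons (by push_cast [List.length_cons]; omega)]
    rw [List.foldl_cons]
    have hinner : aInner d ((pre.length : Nat) : Int) (pre ++ x :: ys, false)
        = ((pre ++ (selGo d x [] ys).1 :: (selGo d x [] ys).2),
            if ys.isEmpty then false else (aInner d ((pre.length : Nat) : Int) (pre ++ x :: ys, false)).2) := by
      cases hy : ys with
      | nil =>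
        simp only [aInner]
        rw [PySem.List.pyRange_one_eq_nil
          (by push_cast [List.length_append, List.length_cons, List.length_nil]; omega)]
        simp [selGo]
      | cons y t =>
        rw [← hy]
        have h1 := L1 d pre ys x [] false
        simp only [List.length_nil, List.nil_append] at h1
        obtain ⟨sw1, h1⟩ := h1
        have hrange : aInner d ((pre.length : Nat) : Int) (pre ++ x :: ys, false)
            = (PySem.List.pyRange ((pre.length + (1 + 0) : Nat) : Int)
                ((pre.length + (1 + (0 + ys.length)) : Nat) : Int) 1).foldl
               (stepJ d ((pre.length : Nat) : Int)) (pre ++ x :: ys, false) := by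
          simp only [aInner, List.length_append, List.length_cons]
          congr 2 <;> push_cast <;> omega
        rw [hrange, h1]
        simp [hy]
    rw [hinner]
    have hlen : (selGo d x [] ys).2.length = ys.length := by
      have := selGo_len d ys x []
      simpa using this
    have hih := ih (selGo d x [] ys).2 (pre ++ [(selGo d x [] ys).1])
      (if ys.isEmpty then false else (aInner d ((pre.length : Nat) : Int) (pre ++ x :: ys, false)).2)
      (by omega)
    simp only [List.length_append, List.length_cons, List.length_nil, List.append_assoc,
      List.singleton_append] at hih ⊢
    have e1 : pre.length + 1 + (selGo d x [] ys).2.length = pre.length + (ys.length + 1) := by omega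
    rw [e1] at hih
    have e2 : ((pre.length : Nat) : Int) + 1 = (((pre.length + 1 : Nat)) : Int) := by push_cast; ring
    rw [e2, hih]
    simp only [selList]
    rcases Decidable.em (ys = []) with h0 | h0
    · have hp : (selGo d x [] ys).2 = [] := by
        apply List.length_eq_zero_iff.mp
        rw [hlen, h0]
        rfl
      simp [h0, hp]
    · have hp : (selGo d x [] ys).2.isEmpty = false := by
        cases hsel : (selGo d x [] ys).2 with
        | nil =>
          exfalso
          rw [hsel] at hlen
          exact h0 (List.length_eq_zero_iff.mp hlen.symm)
        | cons a b => rfl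
      have hy' : ys.isEmpty = false := by
        cases ys with
        | nil => exact absurd rfl h0
        | cons a b => rfl
      simp [hp, hy']

theorem bubble_eq_selList (d : PySem.Dict String Int) (f : Nat) (pgs : List String) :
    aBubble d (f + 1) pgs = selList d pgs := by
  cases pgs with
  | nil =>
    show (if (aPass d ([], false)).2 then aBubble d f (aPass d ([], false)).1
          else (aPass d ([], false)).1) = selList d []
    have h : aPass d ([], false) = ([], false) := by
      simp only [aPass]
      rw [PySem.List.pyRange_one_eq_nil (by simp)]
      rfl
    rw [h]
    simp [selList]
  | cons x ys =>
    have h : aPass d (x :: ys, false) = (selList d (x :: ys), false) := by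
      have h2 := L2 d (x :: ys).length (x :: ys) [] false rfl
      simp only [List.nil_append, List.length_nil, List.isEmpty_cons] at h2
      simpa [aPass] using h2
    show (if (aPass d (x :: ys, false)).2 then aBubble d f (aPass d (x :: ys, false)).1
          else (aPass d (x :: ys, false)).1) = selList d (x :: ys)
    rw [h]
    rfl

theorem getD_build :
    ∀ (lines : List String) (dd : PySem.Dict String Int) (s : String),
      (lines.foldl (fun d L => d.insert L 1) dd).getD s 0
        = if s ∈ lines then (1 : Int) else dd.getD s 0 := by
  intro lines
  induction lines with
  | nil => intro dd s; simp
  | cons L rest ih =>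
    intro dd s
    simp only [List.foldl_cons, ih]
    by_cases h : s ∈ rest
    · simp [h]
    · by_cases h2 : s = L <;> simp [h, h2, PySem.Dict.getD_insert]

theorem containsS (rl : List String) (k : String) :
    PySem.Set.contains (PySem.Set.ofList rl) k = decide (k ∈ rl) := by
  by_cases h : k ∈ rl
  · have hc : PySem.Set.contains (PySem.Set.ofList rl) k = true :=
      (PySem.Set.contains_iff _ _).mpr ((PySem.Set.mem_ofList _ _).mpr h)
    simp [hc, h]
  · have hc : ¬ PySem.Set.contains (PySem.Set.ofList rl) k = true := fun hc =>
      h ((PySem.Set.mem_ofList _ _).mp ((PySem.Set.contains_iff _ _).mp hc))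
    simp only [Bool.not_eq_true] at hc
    simp [hc, h]

theorem fold_eq_selGo (rl : List String) (D : PySem.Dict String Int)
    (hd : ∀ k, D.getD k 0 = if k ∈ rl then (1 : Int) else 0) :
    ∀ (ys : List String) (c : String) (proc : List String),
      ys.foldl (bSelStep (PySem.Set.ofList rl)) (c, proc) = selGo D c proc ys := by
  intro ys
  induction ys with
  | nil => intro c proc; simp [selGo]
  | cons y t ih =>
    intro c proc
    simp only [List.foldl_cons, bSelStep, selGo, containsS, hd]
    by_cases h : (y ++ "|" ++ c) ∈ rl
    · simp [h, ih]
    · simp [h, ih]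

theorem bSel_eq_selList (rl : List String) (D : PySem.Dict String Int)
    (hd : ∀ k, D.getD k 0 = if k ∈ rl then (1 : Int) else 0) :
    ∀ (n : Nat) (pgs : List String), pgs.length = n →
      bSel (PySem.Set.ofList rl) pgs = selList D pgs := by
  intro n
  induction n with
  | zero =>
    intro pgs hn
    have : pgs = [] := List.length_eq_zero_iff.mp hn
    subst this
    simp [bSel, selList]
  | succ n ih =>
    intro pgs hn
    obtain ⟨c, rest, rfl⟩ : ∃ c rest, pgs = c :: rest := by
      cases pgs with
      | nil => simp at hn
      | cons a b => exact ⟨a, b, rfl⟩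
    simp only [bSel, selList, fold_eq_selGo rl D hd]
    congr 1
    apply ih
    have := selGo_len D rest c []
    simp only [List.length_nil, List.length_cons] at this hn
    omega

theorem check_eq (rl : List String) (D : PySem.Dict String Int)
    (hd : ∀ k, D.getD k 0 = if k ∈ rl then (1 : Int) else 0) :
    ∀ (l : List (String × String)),
      aCheck D l = !(l.any fun p => PySem.Set.contains (PySem.Set.ofList rl) (p.2 ++ "|" ++ p.1)) := by
  intro l
  induction l with
  | nil => simp [aCheck]
  | cons p rest ih =>
    obtain ⟨pc, pn⟩ := p
    simp only [aCheck, List.any_cons, containsS, hd]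
    by_cases h : (pn ++ "|" ++ pc) ∈ rl
    · simp [h]
    · simp [h, ih]

theorem zipDL : ∀ (ys xs : List String), ys.length ≤ xs.length - 1 →
    xs.dropLast.zip ys = xs.zip ys := by
  intro ys
  induction ys with
  | nil => intro xs _; simp
  | cons y t ih =>
    intro xs h
    match xs with
    | [] => simp at h
    | [x1] => simp at h
    | x1 :: x2 :: u =>
      have hd : (x1 :: x2 :: u).dropLast = x1 :: (x2 :: u).dropLast := rfl
      rw [hd]
      show (x1, y) :: ((x2 :: u).dropLast.zip t) = (x1, y) :: ((x2 :: u).zip t)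
      congr 1
      apply ih
      simp only [List.length_cons] at h ⊢
      omega

theorem update_eq (rl : List String) (D : PySem.Dict String Int)
    (hd : ∀ k, D.getD k 0 = if k ∈ rl then (1 : Int) else 0) (t : Int) (L : String) :
    (if PySem.Str.len L = 0 then t else aUpdate D t L) = bUpdStep (PySem.Set.ofList rl) t L := by
  by_cases hL : PySem.Str.len L = 0
  · have hL2 : L = "" := by simpa [PySem.Str.len_eq] using hL
    simp [hL, hL2, bUpdStep, PySem.Str.len_eq]
  · rw [if_neg hL]
    simp only [aUpdate, bUpdStep, if_neg hL]
    rw [PySem.List.slice_to_neg_one, PySem.List.slice_from_one,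
      zipDL (splitC L).tail (splitC L) (by simp [List.length_tail]),
      check_eq rl D hd]
    cases hA : ((splitC L).zip (splitC L).tail).any
        (fun p => PySem.Set.contains (PySem.Set.ofList rl) (p.2 ++ "|" ++ p.1)) with
    | false => simp [hA]
    | true =>
      simp only [hA, Bool.not_true, if_false, if_true]
      rw [bubble_eq_selList D, ← bSel_eq_selList rl D hd (splitC L).length (splitC L) rfl]
      simp

theorem phaseUpd (D : PySem.Dict String Int) :
    ∀ (suf : List String) (t : Int),
      suf.foldl aStep (t, D, true)
        = (suf.foldl (fun tot L => if PySem.Str.len L = 0 then tot else aUpdate D tot L) t, D, true) := by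
  intro suf
  induction suf with
  | nil => intro t; rfl
  | cons L rest ih =>
    intro t
    simp only [List.foldl_cons]
    by_cases h : PySem.Str.len L = 0
    · simp only [aStep, h, if_true, ih]
    · simp only [aStep, h, if_false, if_true, ih]

theorem phaseRules :
    ∀ (pre : List String) (t : Int) (D : PySem.Dict String Int), "" ∉ pre →
      pre.foldl aStep (t, D, false)
        = (t, pre.foldl (fun d L => d.insert L 1) D, false) := by
  intro pre
  induction pre with
  | nil => intro t D _; rfl
  | cons L rest ih =>
    intro t D h
    have hL : L ≠ "" := by
      intro hh
      exact h (by simp [hh])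
    have hlen : ¬ (PySem.Str.len L = 0) := by
      simp [PySem.Str.len_eq]
      exact hL
    simp only [List.foldl_cons, aStep, hlen, if_false]
    exact ih t (D.insert L 1) (fun hm => h (List.mem_cons_of_mem _ hm))

theorem part2_eq_alt (data : List String) : part2 data = part2_alt data := by
  cases hidx : PySem.List.index? data "" with
  | none =>
    have hnm : "" ∉ data := (PySem.List.index?_eq_none_iff data "").mp hidx
    simp only [part2, part2_alt, hidx]
    rw [phaseRules data 0 PySem.Dict.empty hnm]
  | some cut =>
    obtain ⟨pre, suf, hdata, hcut, hpre⟩ := (PySem.List.index?_eq_some_iff data "" cut).mp hidx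
    subst hdata
    have hD := fun k => by
      simpa [PySem.Dict.getD_empty] using getD_build pre PySem.Dict.empty k
    simp only [part2, part2_alt, hidx]
    rw [List.foldl_append, phaseRules pre 0 PySem.Dict.empty hpre]
    rw [List.foldl_cons]
    have hstep : aStep (0, pre.foldl (fun d L => d.insert L 1) PySem.Dict.empty, false) ""
        = (0, pre.foldl (fun d L => d.insert L 1) PySem.Dict.empty, true) := by
      simp [aStep, PySem.Str.len_eq]
    rw [hstep, phaseUpd]
    subst hcut
    rw [PySem.List.slice_to_natCast]
    rw [show ((pre.length : Int) + 1) = (((pre.length + 1 : Nat)) : Int) by push_cast; ring]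
    rw [PySem.List.slice_from_natCast]
    have htake : (pre ++ "" :: suf).take pre.length = pre := by
      simp
    have hdrop : (pre ++ "" :: suf).drop (pre.length + 1) = suf := by
      rw [show pre ++ "" :: suf = (pre ++ [""]) ++ suf by simp]
      rw [show pre.length + 1 = (pre ++ [""]).length by simp]
      simp
    rw [htake, hdrop]
    have hfun : (fun tot L => if PySem.Str.len L = 0 then tot else
        aUpdate (pre.foldl (fun d L => d.insert L 1) PySem.Dict.empty) tot L)
        = bUpdStep (PySem.Set.ofList pre) := by
      funext t L
      exact update_eq pre _ hD t L
    rw [hfun]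

-- ===== VERDICT (by name: the statement is the Claim_ definition above) =====
theorem part2_spec : Claim_equal_part2 := by
  intro data _ _
  unfold Spec_part2
  exact part2_eq_alt data
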